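-- pv_equiv track=rewrite | github.com/ijs32/python-whiteboarding | algo-ladder/Basic-Array/skip_it.py | skip_it
-- ===== SOURCE A (Python) =====
-- def skip_it(nums):
--     i = nums[0]         # the variable i will keep track of our skip lengths
--     index_of_array = 0  # the variable index_of_array keeps track of where we are
--     output = [nums[0]]  # output is of course our final solution
--     while i >= 0:
--         # this prevents the loop from continuing if
--         if index_of_array > len(nums):
--             break                       # our index gets bigger than the array length
--         elif i > 0:
--             index_of_array += 1
--             i -= 1
--         elif i == 0:
--             output.append(nums[index_of_array])
--             i = nums[index_of_array]    # gives us new length to skip by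
--     return output
-- ===== SOURCE B (Python) =====
-- def skip_it(nums):
--     out = [nums[0]]
--     pos = 0
--     while nums[pos] >= 0:
--         pos += nums[pos]
--         if pos > len(nums):
--             break
--         out.append(nums[pos])
--     return out
-- ===== Notes on version B (the rewrite author's own statement) =====
-- stated objective: simpler
-- what changed: A keeps a countdown i and walks the array one index per iteration with a three-branch loop; B keeps only the current position and makes one direct arithmetic hop per skip pointer, re-reading nums[pos] as the loop condition, so the countdown state and the decrement branch disappear.
import Mathlib
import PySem

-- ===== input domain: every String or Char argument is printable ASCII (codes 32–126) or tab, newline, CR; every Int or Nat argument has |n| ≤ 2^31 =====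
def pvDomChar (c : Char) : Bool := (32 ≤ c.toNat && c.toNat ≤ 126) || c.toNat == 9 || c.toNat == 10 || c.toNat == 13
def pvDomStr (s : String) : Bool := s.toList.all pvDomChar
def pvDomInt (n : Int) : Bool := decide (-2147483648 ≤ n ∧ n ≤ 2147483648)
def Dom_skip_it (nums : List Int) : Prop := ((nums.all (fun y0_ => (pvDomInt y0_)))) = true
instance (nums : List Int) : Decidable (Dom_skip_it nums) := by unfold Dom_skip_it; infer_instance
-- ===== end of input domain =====

-- B replaces A's three-branch countdown loop (which walks one index per iteration) by a
-- position-following loop: it keeps only the current position and makes one arithmetic hop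
-- per skip pointer (simpler). Both loops are fueled in Lean: the Python programs diverge on
-- inputs excluded by Pre_skip_it; inside Pre_ the fuel bounds are never reached (proved below).

-- ===== PORT A =====
-- the while loop of A; `PySem.List.pyGetD nums idx 0`: nums[idx] — the IndexError case (idx = len) is excluded by Pre_
def loopA (nums : List Int) (fuel : Nat) (i index : Int) (out : List Int) : List Int :=
  match fuel with
  | 0 => out
  | fuel + 1 =>
    if 0 ≤ i then
      if (nums.length : Int) < index then out
      else if 0 < i then loopA nums fuel (i - 1) (index + 1) out
      else
        loopA nums fuel (PySem.List.pyGetD nums index 0) index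
          (out ++ [PySem.List.pyGetD nums index 0])
    else out

def skip_it (nums : List Int) : List Int :=
  let first := PySem.List.pyGetD nums 0 0   -- nums[0]; IndexError on [] is excluded by Pre_
  loopA nums (2 * nums.length + 4) first 0 [first]

-- ===== PORT B =====
-- B's while loop over the position `pos` (always a Nat: it only ever grows by a value just
-- checked nonnegative, hence `.toNat` is exact); `nums.getD pos 0` is B's nums[pos] — the
-- IndexError cases (pos = len in the condition or in the append) are excluded by Pre_
def loopB (nums : List Int) : Nat → Nat → List Int → List Int
  | 0, _, out => out
  | fuel + 1, pos, out =>
    let v := nums.getD pos 0                 -- while nums[pos] >= 0: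
    if v < 0 then out
    else
      let pos' := pos + v.toNat              -- pos += nums[pos]
      if nums.length < pos' then out         -- if pos > len(nums): break
      else loopB nums fuel pos' (out ++ [nums.getD pos' 0])   -- out.append(nums[pos])

def skip_it_alt (nums : List Int) : List Int :=
  loopB nums (nums.length + 1) 0 [nums.getD 0 0]   -- nums[0]; [] excluded by Pre_

-- ===== PRECONDITION & SPEC =====
-- Pre_ follows the input's own skip-pointer chain from position 0 (the structure the function is about):
-- it excludes exactly the inputs on which A does not return — [] and a hop landing exactly at len(nums)
-- (IndexError), and a hop landing on a 0 (A loops forever). The chain is the input's intrinsic linked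
-- structure, so the condition necessarily reads it; it visits each position at most once (positions
-- strictly increase), and gas = nums.length + 1 is that exact bound, not a tuning parameter.
def chainAux (nums : List Int) : Nat → Nat → Bool
  | p, gas + 1 =>
    if h : p < nums.length then
      let v := nums[p]
      if v < 0 then true
      else if v = 0 then false
      else chainAux nums (p + v.toNat) gas
    else decide (nums.length < p)
  | p, 0 => decide (nums.length < p)

def Pre_skip_it (nums : List Int) : Prop := chainAux nums 0 (nums.length + 1) = true
instance (nums : List Int) : Decidable (Pre_skip_it nums) := by unfold Pre_skip_it; infer_instance

def pvWitness_skip_it : List Int := [2, 7, -1, 1, -3]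

def Spec_skip_it (nums : List Int) (out : List Int) : Prop := out = skip_it_alt nums
instance (nums : List Int) (out : List Int) : Decidable (Spec_skip_it nums out) := by unfold Spec_skip_it; infer_instance

-- ===== CLAIM (what is proved, stated in full; the proofs are below) =====
def Claim_equal_skip_it : Prop := ∀ (nums : List Int), Dom_skip_it nums → Pre_skip_it nums → Spec_skip_it nums (skip_it nums)

-- ===== LEMMAS AND PROOFS =====

-- proof-side view of the chain condition: structural recursion on the remaining distance to the end
def chainOKb (nums : List Int) (p : Nat) : Bool :=
  if h : p < nums.length then
    let v := nums[p]
    if v < 0 then true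
    else if v = 0 then false
    else chainOKb nums (p + v.toNat)
  else decide (nums.length < p)
termination_by nums.length - p
decreasing_by
  have hv : 0 < v := by omega
  omega

-- chainAux with enough gas computes chainOKb
theorem chainAux_eq (nums : List Int) : ∀ (gas p : Nat), nums.length + 1 ≤ p + gas →
    chainAux nums p gas = chainOKb nums p := by
  intro gas
  induction gas with
  | zero =>
    intro p hp
    rw [chainAux, chainOKb, dif_neg (by omega)]
  | succ gas ih =>
    intro p hp
    rw [chainAux, chainOKb]
    by_cases h : p < nums.length
    · rw [dif_pos h, dif_pos h]
      by_cases hneg : nums[p] < 0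
      · simp only [if_pos hneg]
      · simp only [if_neg hneg]
        by_cases hz : nums[p] = (0 : Int)
        · simp only [if_pos hz]
        · simp only [if_neg hz]
          exact ih (p + (nums[p]).toNat) (by omega)
    · rw [dif_neg h, dif_neg h]

-- collapsing A's counting phase while it stays in range
theorem countA (nums : List Int) (k : Nat) : ∀ (p : Int) (out : List Int) (fuel : Nat),
    0 ≤ p → p + k ≤ (nums.length : Int) →
    loopA nums (k + 1 + fuel) (k : Int) p out = loopA nums (1 + fuel) 0 (p + k) out := by
  induction k with
  | zero => intro p out fuel _ _; simp
  | succ k ih =>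
    intro p out fuel hp hle
    have h1 : loopA nums (k + 1 + 1 + fuel) ((k + 1 : Nat) : Int) p out
        = loopA nums (k + 1 + fuel) ((k : Nat) : Int) (p + 1) out := by
      have hf : k + 1 + 1 + fuel = (k + 1 + fuel) + 1 := by omega
      rw [hf, loopA]
      have h0 : (0 : Int) ≤ ((k + 1 : Nat) : Int) := by positivity
      have hlt : ¬ ((nums.length : Int) < p) := by push_cast at hle ⊢; omega
      have hpos : (0 : Int) < ((k + 1 : Nat) : Int) := by positivity
      rw [if_pos h0, if_neg hlt, if_pos hpos]
      norm_num
    rw [h1, ih (p + 1) out fuel (by omega) (by push_cast at hle ⊢; omega)]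
    congr 1
    push_cast
    ring

-- A's counting phase when the hop target is past the end: it walks to len+1 and breaks
theorem countA_break (nums : List Int) : ∀ (fuel k : Nat) (p : Int) (out : List Int),
    0 ≤ p → p ≤ (nums.length : Int) + 1 → (nums.length : Int) < p + k →
    (nums.length : Int) + 2 ≤ p + fuel →
    loopA nums fuel (k : Int) p out = out := by
  intro fuel
  induction fuel with
  | zero => intro k p out h1 h2 h3 h4; exfalso; push_cast at *; omega
  | succ fuel ih =>
    intro k p out h1 h2 h3 h4
    rw [loopA]
    have h0 : (0 : Int) ≤ (k : Int) := by positivity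
    rw [if_pos h0]
    by_cases hbr : (nums.length : Int) < p
    · rw [if_pos hbr]
    · rw [if_neg hbr]
      have hk : 0 < k := by by_contra h; push_cast at *; omega
      have hpos : (0 : Int) < (k : Int) := by exact_mod_cast hk
      rw [if_pos hpos]
      have : ((k : Int) - 1) = ((k - 1 : Nat) : Int) := by push_cast [hk]; ring
      rw [this, ih (k - 1) (p + 1) out (by omega) (by omega) (by push_cast at *; omega)
        (by push_cast at *; omega)]

-- main loop correspondence: both loops, started just after appending nums[p], agree under the chain condition
theorem mainLoop (nums : List Int) : ∀ (n p : Nat) (out : List Int) (fuelA fuelB : Nat),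
    nums.length - p ≤ n → p < nums.length → chainOKb nums p = true →
    2 * (nums.length - p) + 2 ≤ fuelA → (nums.length - p) + 1 ≤ fuelB →
    loopA nums fuelA (nums.getD p 0) (p : Int) out
      = loopB nums fuelB p out := by
  intro n
  induction n with
  | zero => intro p out fuelA fuelB h1 h2; omega
  | succ n ih =>
    intro p out fuelA fuelB hn hp hchain hfa hfb
    have hv : nums.getD p 0 = nums[p] := List.getD_eq_getElem nums 0 hp
    rw [chainOKb, dif_pos hp] at hchain
    obtain ⟨fa, rfl⟩ : ∃ fa, fuelA = fa + 1 := ⟨fuelA - 1, by omega⟩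
    obtain ⟨fb, rfl⟩ : ∃ fb, fuelB = fb + 1 := ⟨fuelB - 1, by omega⟩
    by_cases hneg : nums[p] < 0
    · -- negative skip value: both loops stop
      rw [if_pos hneg] at hchain
      rw [loopA, loopB, hv, if_neg (by omega), if_pos hneg]
    · rw [if_neg hneg] at hchain
      by_cases hzero : nums[p] = (0 : Int)
      · rw [if_pos hzero] at hchain; exact absurd hchain (by simp)
      · rw [if_neg hzero] at hchain
        have hvpos : (0 : Int) < nums[p] := by omega
        set k := (nums[p]).toNat with hk
        have hkc : ((k : Nat) : Int) = nums[p] := Int.toNat_of_nonneg (by omega)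
        have hk1 : 1 ≤ k := by omega
        have hB : loopB nums (fb + 1) p out
            = if nums.length < p + k then out
              else loopB nums fb (p + k) (out ++ [nums.getD (p + k) 0]) := by
          rw [loopB]
          simp only [hv, if_neg (by omega : ¬ nums[p] < 0), ← hk]
        by_cases hin : p + k < nums.length
        · -- hop lands inside the list: collapse A's count, one step of B, recurse
          have hA : loopA nums (fa + 1) (nums.getD p 0) (p : Int) out
              = loopA nums (fa + 1 - k) 0 ((p : Int) + k) out := by
            have hsplit : fa + 1 = k + 1 + (fa - k) := by omega
            rw [hv, ← hkc, hsplit,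
              countA nums k (p : Int) out (fa - k) (by positivity) (by omega)]
            congr 1
            omega
          rw [hA]
          have hlandN : ((p : Int) + k) = ((p + k : Nat) : Int) := by push_cast; ring
          have hget : PySem.List.pyGetD nums ((p + k : Nat) : Int) 0 = nums.getD (p + k) 0 :=
            PySem.List.pyGetD_natCast nums (p + k) 0
          obtain ⟨fa', hfa'⟩ : ∃ fa', fa + 1 - k = fa' + 1 := ⟨fa - k, by omega⟩
          have hA2 : loopA nums (fa + 1 - k) 0 ((p : Int) + k) out
              = loopA nums fa' (nums.getD (p + k) 0) ((p + k : Nat) : Int)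
                  (out ++ [nums.getD (p + k) 0]) := by
            rw [hfa', loopA, if_pos le_rfl, if_neg (by omega), if_neg (by omega),
              hlandN, hget]
          rw [hA2, hB, if_neg (by omega)]
          exact ih (p + k) (out ++ [nums.getD (p + k) 0]) fa' fb (by omega) hin hchain
            (by omega) (by omega)
        · -- hop lands at or past len
          have hnl : ¬ (p + k < nums.length) := hin
          rw [chainOKb, dif_neg (by omega)] at hchain
          have hpast : nums.length < p + k := by
            by_contra h
            have : ¬ (nums.length < p + k) := h
            simp [this] at hchain
          -- A breaks after counting to len+1; B breaks at once
          rw [hv, ← hkc,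
            countA_break nums (fa + 1) k (p : Int) out (by positivity) (by omega)
              (by omega) (by omega),
            hB, if_pos hpast]

-- ===== VERDICT (by name: the statement is the Claim_ definition above) =====
theorem skip_it_spec : Claim_equal_skip_it := by
  intro nums _ hpre
  unfold Spec_skip_it skip_it skip_it_alt
  unfold Pre_skip_it at hpre
  rw [chainAux_eq nums (nums.length + 1) 0 (by omega)] at hpre
  have hlen : 0 < nums.length := by
    by_contra h
    rw [chainOKb, dif_neg (by omega)] at hpre
    simp at hpre
  have hfirst : PySem.List.pyGetD nums (0 : Int) 0 = nums.getD 0 0 := by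
    have := PySem.List.pyGetD_natCast nums 0 (0 : Int)
    simpa using this
  simp only [hfirst]
  have := mainLoop nums nums.length 0 [nums.getD 0 0] (2 * nums.length + 4) (nums.length + 1)
    (by omega) hlen hpre (by omega) (by omega)
  simpa using this
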